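-- pv_equiv track=rewrite | github.com/Sree-GMX/suitecraft-ai | backend/app/services/test_plan_ai_service.py | _generate_ticket_summary
-- ===== SOURCE A (Python) =====
-- from typing import List, Dict, Any, Optional
--
-- def _generate_ticket_summary(stories: List[Dict], bugs: List[Dict]) -> str:
--     """Generate a concise summary of tickets"""
--     lines = []
--
--     # Stories by priority
--     lines.append("### Stories")
--     for priority in ['Critical', 'High', 'Medium', 'Low']:
--         priority_stories = [s for s in stories if s.get('priority', '').lower() == priority.lower()]
--         if priority_stories:
--             lines.append(f"- **{priority}**: {len(priority_stories)} stories")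
--             for story in priority_stories[:3]:  # Show first 3
--                 lines.append(f"  - {story.get('issue_key')}: {story.get('summary', '')[:80]}")
--             if len(priority_stories) > 3:
--                 lines.append(f"  - ... and {len(priority_stories) - 3} more")
--
--     # Bugs by priority
--     lines.append("\n### Bugs")
--     for priority in ['Critical', 'High', 'Medium', 'Low']:
--         priority_bugs = [b for b in bugs if b.get('priority', '').lower() == priority.lower()]
--         if priority_bugs:
--             lines.append(f"- **{priority}**: {len(priority_bugs)} bugs")
--             for bug in priority_bugs[:3]:
--                 lines.append(f"  - {bug.get('issue_key')}: {bug.get('summary', '')[:80]}")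
--             if len(priority_bugs) > 3:
--                 lines.append(f"  - ... and {len(priority_bugs) - 3} more")
--
--     return "\n".join(lines)
-- ===== SOURCE B (Python) =====
-- def _generate_ticket_summary(stories, bugs):
--     """Generate a concise summary of tickets (single grouping pass per list)."""
--     def section(title, items, noun):
--         buckets = {}
--         for it in items:
--             buckets.setdefault(it.get('priority', '').lower(), []).append(it)
--         lines = [title]
--         for priority in ['Critical', 'High', 'Medium', 'Low']:
--             group = buckets.get(priority.lower(), [])
--             if group:
--                 lines.append(f"- **{priority}**: {len(group)} {noun}")
--                 lines.extend(f"  - {t.get('issue_key')}: {t.get('summary', '')[:80]}" for t in group[:3])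
--                 if len(group) > 3:
--                     lines.append(f"  - ... and {len(group) - 3} more")
--         return lines
--     return "\n".join(section("### Stories", stories, "stories") + section("\n### Bugs", bugs, "bugs"))
-- ===== Notes on version B (the rewrite author's own statement) =====
-- stated objective: simpler
-- what changed: B replaces A's four full filter scans per list with a single grouping pass into an ordered dict keyed by lowercased priority, plus a shared section formatter that removes the stories/bugs duplication.
import Mathlib
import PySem

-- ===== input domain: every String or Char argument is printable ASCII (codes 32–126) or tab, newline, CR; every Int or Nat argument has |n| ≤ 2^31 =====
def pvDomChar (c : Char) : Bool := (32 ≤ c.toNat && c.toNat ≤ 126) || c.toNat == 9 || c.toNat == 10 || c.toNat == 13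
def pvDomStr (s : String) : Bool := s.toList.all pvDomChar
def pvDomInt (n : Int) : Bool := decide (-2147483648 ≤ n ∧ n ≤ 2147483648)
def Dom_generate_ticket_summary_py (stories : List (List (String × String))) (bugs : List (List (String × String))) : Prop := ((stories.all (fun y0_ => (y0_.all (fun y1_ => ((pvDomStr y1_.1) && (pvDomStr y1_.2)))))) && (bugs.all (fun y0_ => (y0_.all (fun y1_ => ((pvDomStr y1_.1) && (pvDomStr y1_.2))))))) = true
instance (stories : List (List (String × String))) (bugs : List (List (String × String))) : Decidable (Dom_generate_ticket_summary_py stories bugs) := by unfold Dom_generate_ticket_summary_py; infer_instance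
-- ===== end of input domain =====

-- B replaces A's four full filter scans per list by one grouping pass into a dict keyed by
-- lowercased priority plus a shared section formatter (objective: simpler / deduplicated).
-- Shared primitives (the same f-strings / dict.get appear verbatim in both Pythons):
def pvGet? (d : List (String × String)) (k : String) : Option String := (PySem.Dict.mk d).get? k
def pvGetD (d : List (String × String)) (k dflt : String) : String := (PySem.Dict.mk d).getD k dflt
def pvPriorities : List String := ["Critical", "High", "Medium", "Low"]
-- f"- **{priority}**: {n} {noun}"
def pvHeader (priority noun : String) (n : Nat) : String :=
  "- **" ++ priority ++ "**: " ++ PySem.Int.toStr (n : Int) ++ " " ++ noun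
-- f"  - {t.get('issue_key')}: {t.get('summary', '')[:80]}"  (a missing key prints as "None")
def pvFmtItem (t : List (String × String)) : String :=
  "  - " ++ (match pvGet? t "issue_key" with | none => "None" | some v => v) ++ ": " ++
    PySem.Str.slice (pvGetD t "summary" "") none (some 80)
-- f"  - ... and {n - 3} more"
def pvMore (n : Nat) : String := "  - ... and " ++ PySem.Int.toStr ((n : Int) - 3) ++ " more"

-- ===== PORT A =====
-- body of A's `for priority in [...]` loop: filter the whole list, then append the lines
def aStep (items : List (List (String × String))) (noun : String)
    (lines : List String) (priority : String) : List String :=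
  let ps := items.filter (fun s => PySem.Str.lower (pvGetD s "priority" "") == PySem.Str.lower priority)
  if ps.isEmpty then lines
  else
    let lines := lines ++ [pvHeader priority noun ps.length]
    let lines := (PySem.List.slice ps none (some 3)).foldl (fun lines t => lines ++ [pvFmtItem t]) lines
    if 3 < ps.length then lines ++ [pvMore ps.length] else lines

def generate_ticket_summary_py (stories : List (List (String × String))) (bugs : List (List (String × String))) : String :=
  let lines : List String := []
  let lines := lines ++ ["### Stories"]
  let lines := pvPriorities.foldl (aStep stories "stories") lines
  let lines := lines ++ ["\n### Bugs"]
  let lines := pvPriorities.foldl (aStep bugs "bugs") lines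
  PySem.Str.join "\n" lines

-- ===== PORT B =====
-- one grouping pass:  buckets.setdefault(it.get('priority','').lower(), []).append(it)
def pvBuckets (items : List (List (String × String))) : PySem.Dict String (List (List (String × String))) :=
  items.foldl (fun d it => d.modify (PySem.Str.lower (pvGetD it "priority" "")) [] (fun g => g ++ [it])) PySem.Dict.empty

-- lines emitted for one priority, read off the bucket
def bEmit (buckets : PySem.Dict String (List (List (String × String)))) (noun priority : String) : List String :=
  let group := buckets.getD (PySem.Str.lower priority) []
  if group.isEmpty then []
  else pvHeader priority noun group.length ::
    ((PySem.List.slice group none (some 3)).map pvFmtItem ++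
      (if 3 < group.length then [pvMore group.length] else []))

def pvSection (title : String) (items : List (List (String × String))) (noun : String) : List String :=
  title :: pvPriorities.flatMap (bEmit (pvBuckets items) noun)

def generate_ticket_summary_py_alt (stories : List (List (String × String))) (bugs : List (List (String × String))) : String :=
  PySem.Str.join "\n" (pvSection "### Stories" stories "stories" ++ pvSection "\n### Bugs" bugs "bugs")

-- ===== PRECONDITION & SPEC =====
def Spec_generate_ticket_summary_py (stories : List (List (String × String))) (bugs : List (List (String × String))) (out : String) : Prop := out = generate_ticket_summary_py_alt stories bugs
instance (stories : List (List (String × String))) (bugs : List (List (String × String))) (out : String) : Decidable (Spec_generate_ticket_summary_py stories bugs out) := by unfold Spec_generate_ticket_summary_py; infer_instance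

-- ===== CLAIM (what is proved, stated in full; the proofs are below) =====
def Claim_equal_generate_ticket_summary_py : Prop := ∀ (stories : List (List (String × String))) (bugs : List (List (String × String))), Dom_generate_ticket_summary_py stories bugs → Spec_generate_ticket_summary_py stories bugs (generate_ticket_summary_py stories bugs)

-- ===== LEMMAS AND PROOFS =====

-- the bucket for key q holds exactly the items whose lowercased priority is q, in order
theorem pv_bucket_filter (items : List (List (String × String)))
    (d : PySem.Dict String (List (List (String × String)))) (q : String) :
    (items.foldl (fun d it => d.modify (PySem.Str.lower (pvGetD it "priority" "")) [] (fun g => g ++ [it])) d).getD q []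
      = d.getD q [] ++ items.filter (fun it => PySem.Str.lower (pvGetD it "priority" "") == q) := by
  induction items generalizing d with
  | nil => simp
  | cons a l ih =>
    simp only [List.foldl_cons, ih, List.filter_cons, PySem.Dict.getD_modify]
    by_cases h : PySem.Str.lower (pvGetD a "priority" "") = q
    · simp [h]
    · simp [h, Ne.symm h]

-- A's loop body grows `lines` by exactly B's emission for that priority
theorem pv_step_emit (items : List (List (String × String))) (noun : String)
    (lines : List String) (priority : String) :
    aStep items noun lines priority = lines ++ bEmit (pvBuckets items) noun priority := by
  unfold aStep bEmit pvBuckets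
  rw [pv_bucket_filter]
  simp only [PySem.Dict.getD_empty, List.nil_append]
  by_cases h : (items.filter (fun s => PySem.Str.lower (pvGetD s "priority" "") == PySem.Str.lower priority)).isEmpty
  · simp [h]
  · simp only [h, PySem.List.foldl_append_singleton_eq_map]
    split_ifs <;> simp [List.append_assoc]

theorem pv_fold_section (items : List (List (String × String))) (noun : String) (lines : List String) :
    pvPriorities.foldl (aStep items noun) lines
      = lines ++ pvPriorities.flatMap (bEmit (pvBuckets items) noun) := by
  have h : aStep items noun = fun lines p => lines ++ bEmit (pvBuckets items) noun p :=
    funext fun lines => funext fun p => pv_step_emit items noun lines p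
  rw [h, PySem.List.foldl_append_eq_flatMap]

-- ===== VERDICT (by name: the statement is the Claim_ definition above) =====
theorem generate_ticket_summary_py_spec : Claim_equal_generate_ticket_summary_py := by
  intro stories bugs _
  unfold Spec_generate_ticket_summary_py generate_ticket_summary_py generate_ticket_summary_py_alt pvSection
  simp only [pv_fold_section]
  simp
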